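-- pv_equiv track=rewrite | github.com/ZS-UMBCHack/UMBCHack | src/main.py | create_file_list
-- ===== SOURCE A (Python) =====
-- def create_file_list(file):
--     array = []
--     append = False
--     for line in file:
--         word = ""
--         for char in line:
--             if char == "/":
--                 break
--             elif char != "-" and (char != '"'):
--                 word += char
--                 append = True
--             elif char == "-":
--                 break
--         if append:
--             array.append(word)
--             append = False
--     return array
-- ===== SOURCE B (Python) =====
-- def create_file_list(file):
--     array = []
--     for line in file:
--         word = line.split("/", 1)[0].split("-", 1)[0].replace('"', "")
--         if word:
--             array.append(word)
--     return array
-- ===== Notes on version B (the rewrite author's own statement) =====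
-- stated objective: idiomatic
-- what changed: Replaced the character-by-character inner loop with its break statements and the cross-line 'append' boolean flag by chained str.split prefixes plus str.replace and a per-line non-empty test.
import Mathlib
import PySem

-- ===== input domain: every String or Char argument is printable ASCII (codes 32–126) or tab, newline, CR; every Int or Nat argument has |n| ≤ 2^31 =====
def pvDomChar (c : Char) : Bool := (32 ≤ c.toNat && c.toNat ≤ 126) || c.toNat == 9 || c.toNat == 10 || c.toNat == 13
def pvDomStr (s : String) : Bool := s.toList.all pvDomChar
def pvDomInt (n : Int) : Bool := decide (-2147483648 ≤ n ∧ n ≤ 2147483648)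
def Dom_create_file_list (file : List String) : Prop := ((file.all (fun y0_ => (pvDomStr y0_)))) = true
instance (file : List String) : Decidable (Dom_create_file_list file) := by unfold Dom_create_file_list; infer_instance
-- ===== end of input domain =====

-- B replaces A's per-character inner loop (with break statements and a cross-line
-- 'append' flag) by chained split prefixes, replace, and a non-empty test (idiomatic).

-- ===== PORT A =====
-- inner character loop of A: state (word, append); '/' and '-' break
def pvInnerA : List Char → List Char → Bool → List Char × Bool
  | [], word, app => (word, app)
  | c :: rest, word, app =>
    if c = '/' then (word, app)
    else if c ≠ '-' ∧ c ≠ '"' then pvInnerA rest (word ++ [c]) true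
    else if c = '-' then (word, app)
    else pvInnerA rest word app

-- outer loop of A over lines, carrying (array, append)
def pvOuterA : List String → List String → Bool → List String
  | [], arr, _ => arr
  | line :: rest, arr, app =>
    let wa := pvInnerA line.toList [] app
    if wa.2 then pvOuterA rest (arr ++ [String.ofList wa.1]) false
    else pvOuterA rest arr wa.2

def create_file_list (file : List String) : List String := pvOuterA file [] false

-- ===== PORT B =====
-- line.split("/",1)[0].split("-",1)[0]: prefix before the first '/' then before the
-- first '-' (port of the library calls' contract), then replace('"', '')
def pvWordB (line : String) : String :=
  String.ofList ((((line.toList.takeWhile (fun c => c ≠ '/')).takeWhile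
      (fun c => c ≠ '-')).filter (fun c => c ≠ '"')))

def create_file_list_alt (file : List String) : List String :=
  file.foldl (fun arr line => if pvWordB line ≠ "" then arr ++ [pvWordB line] else arr) []

-- ===== PRECONDITION & SPEC =====
def Spec_create_file_list (file : List String) (out : List String) : Prop := out = create_file_list_alt file
instance (file : List String) (out : List String) : Decidable (Spec_create_file_list file out) := by unfold Spec_create_file_list; infer_instance

-- ===== CLAIM (what is proved, stated in full; the proofs are below) =====
def Claim_equal_create_file_list : Prop := ∀ (file : List String), Dom_create_file_list file → Spec_create_file_list file (create_file_list file)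

-- ===== LEMMAS AND PROOFS =====
def pvRep (cs : List Char) : List Char :=
  ((cs.takeWhile (fun c => c ≠ '/')).takeWhile (fun c => c ≠ '-')).filter (fun c => c ≠ '"')

theorem pvInnerA_eq (cs : List Char) : ∀ (word : List Char) (app : Bool),
    pvInnerA cs word app = (word ++ pvRep cs, app || !(pvRep cs).isEmpty) := by
  induction cs with
  | nil => intro word app; simp [pvInnerA, pvRep]
  | cons c rest ih =>
    intro word app
    by_cases h1 : c = '/'
    · simp [pvInnerA, pvRep, h1]
    · by_cases h2 : c = '-'
      · simp [pvInnerA, pvRep, h2]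
      · by_cases h3 : c = '"'
        · simp [pvInnerA, pvRep, h3, ih]
        · rw [pvInnerA, if_neg h1, if_pos (show c ≠ '-' ∧ c ≠ '"' from ⟨h2, h3⟩), ih]
          simp [pvRep, h1, h2, h3]

theorem pvOuterA_eq (file : List String) : ∀ (arr : List String),
    pvOuterA file arr false =
      file.foldl (fun arr line => if pvWordB line ≠ "" then arr ++ [pvWordB line] else arr) arr := by
  induction file with
  | nil => intro arr; simp [pvOuterA]
  | cons line rest ih =>
    intro arr
    have hempty : (pvWordB line = "") ↔ pvRep line.toList = [] := by
      unfold pvWordB pvRep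
      constructor
      · intro h; have := congrArg String.toList h; simpa [pvRep] using this
      · intro h
        rw [h]
    simp only [pvOuterA, pvInnerA_eq, List.foldl_cons, Bool.false_or, List.nil_append]
    by_cases hp : pvRep line.toList = []
    · have hw : pvWordB line = "" := hempty.2 hp
      rw [hp]
      simp only [List.isEmpty_nil, Bool.not_true, if_neg (Bool.false_ne_true)]
      rw [ih, if_neg (by simp [hw])]
    · have hw : pvWordB line ≠ "" := fun h => hp (hempty.1 h)
      have hne : (pvRep line.toList).isEmpty = false := by
        simpa [List.isEmpty_iff] using hp
      rw [hne]
      simp only [Bool.not_false]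
      rw [if_pos trivial, ih, if_pos hw]
      rfl

-- ===== VERDICT (by name: the statement is the Claim_ definition above) =====
theorem create_file_list_spec : Claim_equal_create_file_list := by
  intro file _
  unfold Spec_create_file_list create_file_list create_file_list_alt
  exact pvOuterA_eq file []
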